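-- pv_equiv track=rewrite | github.com/DevTroli/RuTrackGames | rl/rtgames.py | search_with_strategies
-- ===== SOURCE A (Python) =====
-- def search_with_strategies(catalog, query):
--     """
--     Search games with multiple strategies in a single pass.
--     Returns: (results, strategy_name)
--     """
--     query_lower = query.lower().strip()
--     query_words = query_lower.split()
--
--     exact, all_words, any_word = [], [], []
--
--     for g in catalog:
--         name_lower = g["name"].lower()
--         if query_lower in name_lower:
--             exact.append(g)
--         elif len(query_words) > 1 and all(w in name_lower for w in query_words):
--             all_words.append(g)
--         elif len(query_words) > 1 and any(w in name_lower for w in query_words):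
--             any_word.append(g)
--
--     if exact:
--         return exact, "Exact"
--     if all_words:
--         return all_words, "Fuzzy (all words)"
--     if any_word:
--         return any_word, "Fuzzy (any word)"
--     return [], "None"
-- ===== SOURCE B (Python) =====
-- def search_with_strategies(catalog, query):
--     """Same result as A, but as up to three short-circuiting filter passes
--     instead of one classifying loop with three accumulators."""
--     query_lower = query.lower().strip()
--     query_words = query_lower.split()
--
--     exact = [g for g in catalog if query_lower in g["name"].lower()]
--     if exact:
--         return exact, "Exact"
--     if len(query_words) > 1:
--         all_words = [g for g in catalog
--                      if all(w in g["name"].lower() for w in query_words)]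
--         if all_words:
--             return all_words, "Fuzzy (all words)"
--         any_word = [g for g in catalog
--                     if any(w in g["name"].lower() for w in query_words)]
--         if any_word:
--             return any_word, "Fuzzy (any word)"
--     return [], "None"
-- ===== Notes on version B (the rewrite author's own statement) =====
-- stated objective: simpler
-- what changed: Replaced the single loop that classifies each game into three accumulators (with mutually exclusive elif conditions) by up to three independent short-circuiting filter passes whose predicates are the plain match conditions; dropping the negated earlier conditions is sound because each later pass only runs when the previous list was empty.
import Mathlib
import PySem

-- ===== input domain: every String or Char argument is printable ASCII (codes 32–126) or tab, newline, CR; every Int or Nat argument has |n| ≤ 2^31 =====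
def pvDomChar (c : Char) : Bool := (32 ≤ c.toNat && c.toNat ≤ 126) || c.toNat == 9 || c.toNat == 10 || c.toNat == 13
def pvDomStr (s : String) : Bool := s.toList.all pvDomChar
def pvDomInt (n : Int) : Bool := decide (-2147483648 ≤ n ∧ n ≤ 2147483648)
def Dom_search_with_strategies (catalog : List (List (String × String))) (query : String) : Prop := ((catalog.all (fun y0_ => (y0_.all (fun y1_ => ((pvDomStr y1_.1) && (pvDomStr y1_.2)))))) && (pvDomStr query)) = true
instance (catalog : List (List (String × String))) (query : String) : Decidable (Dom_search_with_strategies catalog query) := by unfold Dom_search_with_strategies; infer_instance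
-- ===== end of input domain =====

-- B replaces A's single classifying loop with three accumulators by up to three
-- short-circuiting filter passes (simpler decomposition, same cost).


-- g["name"]: first-match association-list lookup (exact for a Python dict under the
-- type convention); none = KeyError, excluded by Pre_.
def pvGetName : List (String × String) → Option String
  | [] => none
  | (k, v) :: t => if k == "name" then some v else pvGetName t

-- ===== PORT A =====
def search_with_strategies (catalog : List (List (String × String))) (query : String) : (List (List (String × String))) × String :=
  let query_lower := PySem.Str.strip (PySem.Str.lower query)
  let query_words := PySem.Str.split₀ query_lower
  let acc := catalog.foldl (fun (acc : List (List (String × String)) × List (List (String × String)) × List (List (String × String))) g =>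
      let name_lower := PySem.Str.lower ((pvGetName g).getD "")
      if PySem.Str.isIn query_lower name_lower then
        (acc.1 ++ [g], acc.2.1, acc.2.2)
      else if decide (1 < query_words.length) && query_words.all (fun w => PySem.Str.isIn w name_lower) then
        (acc.1, acc.2.1 ++ [g], acc.2.2)
      else if decide (1 < query_words.length) && query_words.any (fun w => PySem.Str.isIn w name_lower) then
        (acc.1, acc.2.1, acc.2.2 ++ [g])
      else acc) ([], [], [])
  if acc.1 ≠ [] then (acc.1, "Exact")
  else if acc.2.1 ≠ [] then (acc.2.1, "Fuzzy (all words)")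
  else if acc.2.2 ≠ [] then (acc.2.2, "Fuzzy (any word)")
  else ([], "None")

-- ===== PORT B =====
def search_with_strategies_alt (catalog : List (List (String × String))) (query : String) : (List (List (String × String))) × String :=
  let query_lower := PySem.Str.strip (PySem.Str.lower query)
  let query_words := PySem.Str.split₀ query_lower
  let exact := catalog.filter (fun g => PySem.Str.isIn query_lower (PySem.Str.lower ((pvGetName g).getD "")))
  if exact ≠ [] then (exact, "Exact")
  else if decide (1 < query_words.length) then
    let all_words := catalog.filter (fun g => query_words.all (fun w => PySem.Str.isIn w (PySem.Str.lower ((pvGetName g).getD ""))))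
    if all_words ≠ [] then (all_words, "Fuzzy (all words)")
    else
      let any_word := catalog.filter (fun g => query_words.any (fun w => PySem.Str.isIn w (PySem.Str.lower ((pvGetName g).getD ""))))
      if any_word ≠ [] then (any_word, "Fuzzy (any word)")
      else ([], "None")
  else ([], "None")

-- ===== PRECONDITION & SPEC =====
-- Pre_ excludes catalog entries without a "name" key, on which Python A raises KeyError.
def Pre_search_with_strategies (catalog : List (List (String × String))) (query : String) : Prop :=
  ∀ g ∈ catalog, "name" ∈ g.map Prod.fst
instance (catalog : List (List (String × String))) (query : String) : Decidable (Pre_search_with_strategies catalog query) := by unfold Pre_search_with_strategies; infer_instance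
def pvWitness_search_with_strategies : (List (List (String × String))) × String :=
  ([[("name", "Halo 2")], [("name", "Mario Kart")]], "halo")

def Spec_search_with_strategies (catalog : List (List (String × String))) (query : String) (out : (List (List (String × String))) × String) : Prop := out = search_with_strategies_alt catalog query
instance (catalog : List (List (String × String))) (query : String) (out : (List (List (String × String))) × String) : Decidable (Spec_search_with_strategies catalog query out) := by unfold Spec_search_with_strategies; infer_instance

-- ===== CLAIM (what is proved, stated in full; the proofs are below) =====
def Claim_equal_search_with_strategies : Prop := ∀ (catalog : List (List (String × String))) (query : String), Dom_search_with_strategies catalog query → Pre_search_with_strategies catalog query → Spec_search_with_strategies catalog query (search_with_strategies catalog query)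

-- ===== LEMMAS AND PROOFS =====

-- A's loop yields the three filters of its (mutually exclusive) branch conditions.
theorem pv_foldl_classify {α : Type} (p q r : α → Bool) (xs : List α)
    (e a n : List α) :
    xs.foldl (fun acc g =>
        if p g then (acc.1 ++ [g], acc.2.1, acc.2.2)
        else if q g then (acc.1, acc.2.1 ++ [g], acc.2.2)
        else if r g then (acc.1, acc.2.1, acc.2.2 ++ [g])
        else acc) (e, a, n)
      = (e ++ xs.filter p,
         a ++ xs.filter (fun g => !p g && q g),
         n ++ xs.filter (fun g => !p g && !q g && r g)) := by
  induction xs generalizing e a n with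
  | nil => simp
  | cons x t ih =>
    simp only [List.foldl_cons, List.filter_cons]
    by_cases hp : p x = true
    · simp [hp, ih]
    · simp only [Bool.not_eq_true] at hp
      by_cases hq : q x = true
      · simp [hp, hq, ih]
      · simp only [Bool.not_eq_true] at hq
        by_cases hr : r x = true <;> simp [hp, hq, hr, ih]

-- Generic fact: A's classify-then-pick shape equals B's pass-by-pass shape.
theorem pv_combined {α : Type} (p a2 a3 : α → Bool) (L : Bool) (xs : List α) :
    (let acc := xs.foldl (fun (acc : List α × List α × List α) g =>
        if p g then (acc.1 ++ [g], acc.2.1, acc.2.2)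
        else if L && a2 g then (acc.1, acc.2.1 ++ [g], acc.2.2)
        else if L && a3 g then (acc.1, acc.2.1, acc.2.2 ++ [g])
        else acc) ([], [], []);
     if acc.1 ≠ [] then (acc.1, "Exact")
     else if acc.2.1 ≠ [] then (acc.2.1, "Fuzzy (all words)")
     else if acc.2.2 ≠ [] then (acc.2.2, "Fuzzy (any word)")
     else ([], "None"))
    =
    (let exact := xs.filter p;
     if exact ≠ [] then (exact, "Exact")
     else if L then
       let aw := xs.filter a2;
       if aw ≠ [] then (aw, "Fuzzy (all words)")
       else
         let an := xs.filter a3;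
         if an ≠ [] then (an, "Fuzzy (any word)") else ([], "None")
     else ([], "None")) := by
  simp only [pv_foldl_classify p (fun g => L && a2 g) (fun g => L && a3 g), List.nil_append]
  by_cases he : xs.filter p = []
  · have hpf : ∀ g ∈ xs, p g = false := by
      simpa using (List.filter_eq_nil_iff.mp he)
    cases L with
    | false => simp [he]
    | true =>
      simp only [Bool.true_and]
      have hq2 : xs.filter (fun g => !p g && a2 g) = xs.filter a2 :=
        List.filter_congr (fun g hg => by simp [hpf g hg])
      rw [hq2]
      by_cases ha : xs.filter a2 = []
      · have haf : ∀ g ∈ xs, a2 g = false := by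
          simpa using (List.filter_eq_nil_iff.mp ha)
        have hr2 : xs.filter (fun g => !p g && !a2 g && a3 g) = xs.filter a3 :=
          List.filter_congr (fun g hg => by simp [hpf g hg, haf g hg])
        rw [hr2]
        simp [he, ha]
      · simp [he, ha]
  · simp [he]

theorem search_with_strategies_eq_alt (catalog : List (List (String × String))) (query : String) :
    search_with_strategies catalog query = search_with_strategies_alt catalog query :=
  pv_combined
    (fun g => PySem.Str.isIn (PySem.Str.strip (PySem.Str.lower query)) (PySem.Str.lower ((pvGetName g).getD "")))
    (fun g => (PySem.Str.split₀ (PySem.Str.strip (PySem.Str.lower query))).all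
        (fun w => PySem.Str.isIn w (PySem.Str.lower ((pvGetName g).getD ""))))
    (fun g => (PySem.Str.split₀ (PySem.Str.strip (PySem.Str.lower query))).any
        (fun w => PySem.Str.isIn w (PySem.Str.lower ((pvGetName g).getD ""))))
    (decide (1 < (PySem.Str.split₀ (PySem.Str.strip (PySem.Str.lower query))).length))
    catalog

-- ===== VERDICT (by name: the statement is the Claim_ definition above) =====
theorem search_with_strategies_spec : Claim_equal_search_with_strategies := by
  intro catalog query _ _
  unfold Spec_search_with_strategies
  exact search_with_strategies_eq_alt catalog query
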